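-- pv_equiv track=rewrite | github.com/AckbadP/scrim-trimmer | src/log_matcher.py | _find_best_t0
-- ===== SOURCE A (Python) =====
-- from typing import Dict, List, Optional
--
-- def _find_best_t0(candidates: List[int]) -> int:
--     """
--     Return the t0 value with the densest cluster within ±2 seconds.
--     Ties are broken by preferring the higher value (tighter lower bound).
--     """
--     best_t0 = candidates[0]
--     best_score = 0
--     for c in candidates:
--         score = sum(1 for x in candidates if abs(x - c) <= 2)
--         if score > best_score or (score == best_score and c > best_t0):
--             best_score = score
--             best_t0 = c
--     return best_t0
-- ===== SOURCE B (Python) =====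
-- def _find_best_t0(candidates):
--     """Sort once, then a sliding window gives each candidate's +/-2 cluster
--     size in O(n log n) total; keep the lexicographic max of (score, value)."""
--     s = sorted(candidates)
--     n = len(s)
--     best_t0 = s[0]
--     best_score = 0
--     lo = 0
--     hi = 0
--     for i in range(n):
--         c = s[i]
--         while s[lo] < c - 2:
--             lo += 1
--         while hi < n and s[hi] <= c + 2:
--             hi += 1
--         score = hi - lo
--         if score > best_score or (score == best_score and c > best_t0):
--             best_score = score
--             best_t0 = c
--     return best_t0
-- ===== Notes on version B (the rewrite author's own statement) =====
-- stated objective: faster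
-- what changed: Replaces the quadratic per-candidate rescan with one sort plus a two-pointer sliding window that counts each candidate's +/-2 neighbourhood in amortised O(1), keeping the lexicographic max of (score, value).
import Mathlib
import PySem

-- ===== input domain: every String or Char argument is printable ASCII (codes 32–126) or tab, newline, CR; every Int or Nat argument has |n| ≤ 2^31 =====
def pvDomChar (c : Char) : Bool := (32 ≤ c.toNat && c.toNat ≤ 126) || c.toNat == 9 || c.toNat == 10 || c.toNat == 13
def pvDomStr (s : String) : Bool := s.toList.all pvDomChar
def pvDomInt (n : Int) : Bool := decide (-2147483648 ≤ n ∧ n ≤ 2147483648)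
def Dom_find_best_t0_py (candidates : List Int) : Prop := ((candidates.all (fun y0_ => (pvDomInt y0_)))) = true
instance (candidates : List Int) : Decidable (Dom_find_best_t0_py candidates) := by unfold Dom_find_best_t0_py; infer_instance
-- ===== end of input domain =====

-- B replaces A's quadratic per-candidate rescan by one sort plus a two-pointer
-- sliding window (objective: faster, asymptotically).

-- ===== PORT A =====
-- score = sum(1 for x in candidates if abs(x - c) <= 2)
def pvScoreA (candidates : List Int) (c : Int) : Int :=
  candidates.foldl (fun acc x => if |x - c| ≤ 2 then acc + 1 else acc) 0

def find_best_t0_py (candidates : List Int) : Int :=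
  match candidates with
  | [] => 0  -- Python raises IndexError on candidates[0]; excluded by Pre_
  | c0 :: _ =>
    (candidates.foldl (fun (st : Int × Int) c =>
        let score := pvScoreA candidates c
        if score > st.2 ∨ (score = st.2 ∧ c > st.1) then (c, score) else st)
      (c0, 0)).1

-- ===== PORT B =====
-- while s[lo] < t: lo += 1   (the bound check is only for totality; B's Python never runs past the end here)
def pvAdvLo (s : List Int) (t : Int) (lo : Nat) : Nat :=
  if h : lo < s.length then
    if s[lo] < t then pvAdvLo s t (lo + 1) else lo
  else lo
termination_by s.length - lo

-- while hi < n and s[hi] <= t: hi += 1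
def pvAdvHi (s : List Int) (t : Int) (hi : Nat) : Nat :=
  if h : hi < s.length then
    if s[hi] ≤ t then pvAdvHi s t (hi + 1) else hi
  else hi
termination_by s.length - hi

-- for i in range(n): … of B
def pvLoopB (s : List Int) (i lo hi : Nat) (best : Int × Int) : Int × Int :=
  if h : i < s.length then
    let c := s[i]
    let lo' := pvAdvLo s (c - 2) lo
    let hi' := pvAdvHi s (c + 2) hi
    let score : Int := (hi' : Int) - (lo' : Int)
    let best' := if score > best.2 ∨ (score = best.2 ∧ c > best.1) then (c, score) else best
    pvLoopB s (i + 1) lo' hi' best'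
  else best
termination_by s.length - i

def find_best_t0_py_alt (candidates : List Int) : Int :=
  let s := PySem.List.sorted candidates (fun x => x) false
  match s with
  | [] => 0  -- Python raises IndexError on s[0]; excluded by Pre_
  | s0 :: _ => (pvLoopB s 0 0 0 (s0, 0)).1

-- ===== PRECONDITION & SPEC =====
-- Pre_ excludes only the empty list, on which the Python A raises IndexError (candidates[0]).
def Pre_find_best_t0_py (candidates : List Int) : Prop := candidates ≠ []
instance (candidates : List Int) : Decidable (Pre_find_best_t0_py candidates) := by
  unfold Pre_find_best_t0_py; infer_instance

def pvWitness_find_best_t0_py : List Int := [3, 1, 3, 7]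

def Spec_find_best_t0_py (candidates : List Int) (out : Int) : Prop := out = find_best_t0_py_alt candidates
instance (candidates : List Int) (out : Int) : Decidable (Spec_find_best_t0_py candidates out) := by unfold Spec_find_best_t0_py; infer_instance

-- ===== CLAIM (what is proved, stated in full; the proofs are below) =====
def Claim_equal_find_best_t0_py : Prop := ∀ (candidates : List Int), Dom_find_best_t0_py candidates → Pre_find_best_t0_py candidates → Spec_find_best_t0_py candidates (find_best_t0_py candidates)

-- ===== LEMMAS AND PROOFS =====

-- the "keep the better (score, value)" update, as a binary max on (value, score) pairs
def pvPmax (p q : Int × Int) : Int × Int :=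
  if q.2 > p.2 ∨ (q.2 = p.2 ∧ q.1 > p.1) then q else p

theorem pvPmax_assoc (p q r : Int × Int) : pvPmax (pvPmax p q) r = pvPmax p (pvPmax q r) := by
  obtain ⟨a, b⟩ := p; obtain ⟨c, d⟩ := q; obtain ⟨e, f⟩ := r
  simp only [pvPmax]
  split_ifs <;> simp_all [Prod.mk.injEq] <;> omega

theorem pvPmax_right_comm (a p q : Int × Int) :
    pvPmax (pvPmax a p) q = pvPmax (pvPmax a q) p := by
  obtain ⟨a1, a2⟩ := a; obtain ⟨c, d⟩ := p; obtain ⟨e, f⟩ := q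
  simp only [pvPmax]
  split_ifs <;> simp_all [Prod.mk.injEq] <;> omega

theorem foldl_pvPmax_perm {l₁ l₂ : List (Int × Int)} (h : l₁.Perm l₂) (a : Int × Int) :
    l₁.foldl pvPmax a = l₂.foldl pvPmax a := by
  induction h generalizing a with
  | nil => rfl
  | cons x _ ih => simpa using ih _
  | swap x y l => simp [List.foldl, pvPmax_right_comm]
  | trans _ _ ih₁ ih₂ => exact (ih₁ a).trans (ih₂ a)

theorem foldl_pvPmax_cons (ps : List (Int × Int)) : ∀ a p : Int × Int,
    (p :: ps).foldl pvPmax a = pvPmax a (ps.foldl pvPmax p) := by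
  induction ps with
  | nil => intro a p; rfl
  | cons q qs ih =>
    intro a p
    calc (p :: q :: qs).foldl pvPmax a
        = (q :: qs).foldl pvPmax (pvPmax a p) := rfl
      _ = pvPmax (pvPmax a p) (qs.foldl pvPmax q) := ih _ _
      _ = pvPmax a (pvPmax p (qs.foldl pvPmax q)) := pvPmax_assoc _ _ _
      _ = pvPmax a ((q :: qs).foldl pvPmax p) := by rw [ih p q]

theorem foldl_pvPmax_mem (ps : List (Int × Int)) : ∀ p : Int × Int,
    ps.foldl pvPmax p ∈ p :: ps := by
  induction ps with
  | nil => intro p; simp [List.foldl]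
  | cons q qs ih =>
    intro p
    have hm := ih (pvPmax p q)
    have hpq : pvPmax p q = q ∨ pvPmax p q = p := by
      unfold pvPmax; split_ifs <;> simp
    simp only [List.foldl_cons]
    rcases List.mem_cons.mp hm with h1 | h1
    · rw [h1]; rcases hpq with h | h <;> simp [h]
    · simp [h1]

-- the counting fold in A's score is countP
theorem pvScoreA_eq_countP (cs : List Int) (c : Int) :
    pvScoreA cs c = ((cs.countP fun x => decide (|x - c| ≤ 2)) : Int) := by
  have h : ∀ (l : List Int) (a : Int),
      l.foldl (fun acc x => if |x - c| ≤ 2 then acc + 1 else acc) a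
        = a + ((l.countP fun x => decide (|x - c| ≤ 2)) : Int) := by
    intro l
    induction l with
    | nil => simp
    | cons x xs ih =>
      intro a
      by_cases hx : |x - c| ≤ 2 <;> simp [List.countP_cons, hx, ih] <;> push_cast <;> ring
  simpa using h cs 0

-- in a sorted list a ≤-downward-closed predicate holds exactly on the first countP indices
theorem sorted_countP_char {s : List Int} (hs : s.Pairwise (· ≤ ·)) {p : Int → Bool}
    (hmono : ∀ a b : Int, a ≤ b → p b = true → p a = true) :
    ∀ i (h : i < s.length), (p s[i] = true ↔ i < s.countP p) := by
  induction s with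
  | nil => intro i h; simp at h
  | cons x xs ih =>
    have hx : ∀ y ∈ xs, x ≤ y := (List.pairwise_cons.mp hs).1
    have hxs : xs.Pairwise (· ≤ ·) := (List.pairwise_cons.mp hs).2
    intro i h
    match i with
    | 0 =>
      simp only [List.getElem_cons_zero, List.countP_cons]
      by_cases hp : p x = true
      · simp [hp]
      · have hz : xs.countP p = 0 := by
          rw [List.countP_eq_zero]
          intro y hy hpy
          exact hp (hmono x y (hx y hy) hpy)
        simp [hp, hz]
    | i + 1 =>
      have h' : i < xs.length := by simpa using h
      have hchar := ih hxs i h'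
      simp only [List.getElem_cons_succ, List.countP_cons]
      by_cases hpx : p x = true
      · simp only [hpx, if_pos]
        rw [hchar]
        simp
      · have hz : xs.countP p = 0 := by
          rw [List.countP_eq_zero]
          intro y hy hpy
          exact hpx (hmono x y (hx y hy) hpy)
        have hy : ¬ p (xs[i]) = true := by
          intro hpy
          have := hchar.mp hpy
          omega
        simp [hpx, hz, hy]

theorem pvAdvLo_eq (s : List Int) (hs : s.Pairwise (· ≤ ·)) (t : Int) (lo : Nat)
    (hlo : lo ≤ s.countP (fun x => decide (x < t))) :
    pvAdvLo s t lo = s.countP (fun x => decide (x < t)) := by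
  have hmono : ∀ a b : Int, a ≤ b → decide (b < t) = true → decide (a < t) = true := by
    intro a b hab hb; simp at hb ⊢; omega
  rw [pvAdvLo]
  by_cases h : lo < s.length
  · rw [dif_pos h]
    by_cases h2 : s[lo] < t
    · rw [if_pos h2]
      have hlt : lo < s.countP (fun x => decide (x < t)) :=
        (sorted_countP_char hs hmono lo h).mp (by simpa using h2)
      exact pvAdvLo_eq s hs t (lo + 1) hlt
    · rw [if_neg h2]
      have hn : ¬ lo < s.countP (fun x => decide (x < t)) := by
        intro hk
        exact h2 (by simpa using (sorted_countP_char hs hmono lo h).mpr hk)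
      omega
  · rw [dif_neg h]
    have := List.countP_le_length (p := fun x => decide (x < t)) (l := s)
    omega
termination_by s.length - lo
decreasing_by omega

theorem pvAdvHi_eq (s : List Int) (hs : s.Pairwise (· ≤ ·)) (t : Int) (hi : Nat)
    (hhi : hi ≤ s.countP (fun x => decide (x ≤ t))) :
    pvAdvHi s t hi = s.countP (fun x => decide (x ≤ t)) := by
  have hmono : ∀ a b : Int, a ≤ b → decide (b ≤ t) = true → decide (a ≤ t) = true := by
    intro a b hab hb; simp at hb ⊢; omega
  rw [pvAdvHi]
  by_cases h : hi < s.length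
  · rw [dif_pos h]
    by_cases h2 : s[hi] ≤ t
    · rw [if_pos h2]
      have hlt : hi < s.countP (fun x => decide (x ≤ t)) :=
        (sorted_countP_char hs hmono hi h).mp (by simpa using h2)
      exact pvAdvHi_eq s hs t (hi + 1) hlt
    · rw [if_neg h2]
      have hn : ¬ hi < s.countP (fun x => decide (x ≤ t)) := by
        intro hk
        exact h2 (by simpa using (sorted_countP_char hs hmono hi h).mpr hk)
      omega
  · rw [dif_neg h]
    have := List.countP_le_length (p := fun x => decide (x ≤ t)) (l := s)
    omega
termination_by s.length - hi
decreasing_by omega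

-- window identity: count(≤ c+2) = count(< c-2) + count(|·-c| ≤ 2)
theorem countP_window (s : List Int) (c : Int) :
    s.countP (fun x => decide (x ≤ c + 2))
      = s.countP (fun x => decide (x < c - 2)) + s.countP (fun x => decide (|x - c| ≤ 2)) := by
  induction s with
  | nil => simp
  | cons x xs ih =>
    simp only [List.countP_cons, ih]
    have habs : (|x - c| ≤ 2) ↔ (-2 ≤ x - c ∧ x - c ≤ 2) := abs_le
    by_cases h1 : x ≤ c + 2 <;> by_cases h2 : x < c - 2 <;> by_cases h3 : |x - c| ≤ 2 <;>
      simp [h1, h2, h3] <;> omega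

theorem pvLoopB_eq (s : List Int) (hs : s.Pairwise (· ≤ ·)) (i lo hi : Nat) (best : Int × Int)
    (hinv : ∀ h : i < s.length,
        lo ≤ s.countP (fun x => decide (x < s[i] - 2)) ∧
        hi ≤ s.countP (fun x => decide (x ≤ s[i] + 2))) :
    pvLoopB s i lo hi best
      = ((s.drop i).map (fun c => (c, ((s.countP fun x => decide (|x - c| ≤ 2)) : Int)))).foldl
          pvPmax best := by
  rw [pvLoopB]
  by_cases h : i < s.length
  · rw [dif_pos h]
    obtain ⟨h1, h2⟩ := hinv h
    have hlo' : pvAdvLo s (s[i] - 2) lo = s.countP (fun x => decide (x < s[i] - 2)) :=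
      pvAdvLo_eq s hs (s[i] - 2) lo h1
    have hhi' : pvAdvHi s (s[i] + 2) hi = s.countP (fun x => decide (x ≤ s[i] + 2)) :=
      pvAdvHi_eq s hs (s[i] + 2) hi h2
    have hwin := countP_window s s[i]
    have hle : s.countP (fun x => decide (x < s[i] - 2)) ≤ s.countP (fun x => decide (x ≤ s[i] + 2)) := by
      apply List.countP_mono_left
      intro a _ ha
      simp at ha ⊢
      omega
    have hscore : ((s.countP (fun x => decide (x ≤ s[i] + 2)) : Int)
          - (s.countP (fun x => decide (x < s[i] - 2)) : Int))
        = ((s.countP fun x => decide (|x - s[i]| ≤ 2)) : Int) := by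
      omega
    have hinv' : ∀ h' : i + 1 < s.length,
        s.countP (fun x => decide (x < s[i] - 2)) ≤ s.countP (fun x => decide (x < s[i+1] - 2)) ∧
        s.countP (fun x => decide (x ≤ s[i] + 2)) ≤ s.countP (fun x => decide (x ≤ s[i+1] + 2)) := by
      intro h'
      have hle2 : s[i] ≤ s[i+1] :=
        (List.pairwise_iff_getElem.mp hs) i (i+1) h h' (by omega)
      constructor <;> apply List.countP_mono_left <;> intro a _ ha <;> simp at ha ⊢ <;> omega
    have hdrop : s.drop i = s[i] :: s.drop (i + 1) := List.drop_eq_getElem_cons h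
    simp only [hlo', hhi']
    rw [pvLoopB_eq s hs (i + 1) _ _ _ hinv']
    rw [hdrop, List.map_cons, List.foldl_cons]
    congr 1
    rw [hscore]
    simp [pvPmax]
  · rw [dif_neg h]
    have : s.drop i = [] := List.drop_eq_nil_of_le (by omega)
    simp [this]
termination_by s.length - i
decreasing_by omega

-- ===== VERDICT (by name: the statement is the Claim_ definition above) =====
theorem find_best_t0_py_spec : Claim_equal_find_best_t0_py := by
  intro candidates _ hpre
  unfold Spec_find_best_t0_py
  match hcs : candidates with
  | [] => exact absurd rfl hpre
  | c0 :: rest =>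
    rcases hseq : PySem.List.sorted (c0 :: rest) (fun x => x) false with _ | ⟨s0, s'⟩
    · have hp := PySem.List.sorted_perm (c0 :: rest) (fun x => x) false
      rw [hseq] at hp
      exact absurd (hp.symm.eq_nil) (by simp)
    · have hperm : (s0 :: s').Perm (c0 :: rest) := by
        have := PySem.List.sorted_perm (c0 :: rest) (fun x => x) false
        rwa [hseq] at this
      have hpair : (s0 :: s').Pairwise (· ≤ ·) := by
        have := PySem.List.sorted_pairwise (xs := c0 :: rest) (key := fun x => x)
        rw [hseq] at this
        simpa using this
      set g : Int → Int × Int :=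
        fun c => (c, (((s0 :: s').countP fun x => decide (|x - c| ≤ 2)) : Int)) with hg
      -- A's fold is a pvPmax fold over the mapped list
      have hstep : (fun (st : Int × Int) c =>
            let score := pvScoreA (c0 :: rest) c
            if score > st.2 ∨ (score = st.2 ∧ c > st.1) then (c, score) else st)
          = fun st c => pvPmax st (g c) := by
        funext st c
        have hsc : pvScoreA (c0 :: rest) c
            = (((s0 :: s').countP fun x => decide (|x - c| ≤ 2)) : Int) := by
          rw [pvScoreA_eq_countP, hperm.countP_eq]
        simp [pvPmax, hg, hsc]
      have hA : find_best_t0_py (c0 :: rest)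
          = (((c0 :: rest).map g).foldl pvPmax (c0, 0)).1 := by
        unfold find_best_t0_py
        rw [hstep, List.foldl_map]
      -- B's loop is the same fold over the sorted list
      have hB : find_best_t0_py_alt (c0 :: rest)
          = (((s0 :: s').map g).foldl pvPmax (s0, 0)).1 := by
        simp only [find_best_t0_py_alt, hseq]
        rw [pvLoopB_eq (s0 :: s') hpair 0 0 0 (s0, 0) (fun _ => ⟨Nat.zero_le _, Nat.zero_le _⟩)]
        rfl
      -- both folds reduce to the max M of the mapped elements
      have hmapperm : ((c0 :: rest).map g).Perm ((s0 :: s').map g) := (hperm.symm).map g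
      set M : Int × Int := (s'.map g).foldl pvPmax (g s0) with hMdef
      have hMmem : M ∈ (g s0) :: s'.map g := foldl_pvPmax_mem _ _
      have hMpos : M.2 ≥ 1 := by
        have hmm : M ∈ (s0 :: s').map g := by simpa using hMmem
        obtain ⟨c, hc, hgc⟩ := List.mem_map.mp hmm
        have hcnt : 0 < (s0 :: s').countP (fun x => decide (|x - c| ≤ 2)) :=
          List.countP_pos_iff.mpr ⟨c, hc, by simp⟩
        rw [← hgc]
        show (1 : Int) ≤ (((s0 :: s').countP fun x => decide (|x - c| ≤ 2)) : Int)
        exact_mod_cast hcnt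
      have habs : ∀ x : Int, pvPmax (x, 0) M = M := by
        intro x
        unfold pvPmax
        rw [if_pos (Or.inl (by simpa using hMpos))]
      rw [hA, hB]
      rw [foldl_pvPmax_perm hmapperm]
      rw [show (s0 :: s').map g = g s0 :: s'.map g from by simp]
      rw [foldl_pvPmax_cons, foldl_pvPmax_cons, ← hMdef, habs c0, habs s0]
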